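-- pv_equiv track=rewrite | github.com/laurenchen0631/interview | cracking_code_interview/Bit Manipulation/03. longest_one.py | longest_one_opt
-- ===== SOURCE A (Python) =====
-- def longest_one_opt(num):
--   current_length = 0
--   prev_length = 0
--   max_length = 1
--   while num > 0:
--     if num & 1 == 1:
--       current_length += 1
--     else:
--       prev_length = 0 if (num & 0b10) == 0 else current_length
--       current_length = 0
--     max_length = max(prev_length + current_length + 1, max_length)
--     num >>= 1
--   return max_length
-- ===== SOURCE B (Python) =====
-- def rle(n):
--     # run-length encode the bits of n, LSB first: list of (bit, run_length)
--     runs = []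
--     while n > 0:
--         b = n & 1
--         c = 0
--         while n > 0 and (n & 1) == b:
--             c += 1
--             n >>= 1
--         runs.append((b, c))
--     return runs
--
-- def scan(runs, prev_ones):
--     # max of 1, (each 1-run + 1), and (ones_before + ones_after + 1) across
--     # every zero-gap of length exactly 1
--     if not runs:
--         return 1
--     b, c = runs[0]
--     rest = runs[1:]
--     if b == 1:
--         return max(c + 1, scan(rest, c))
--     if c == 1:
--         nxt = rest[0][1] if rest else 0
--         return max(prev_ones + nxt + 1, scan(rest, 0))
--     return scan(rest, 0)
--
-- def longest_one_opt(num):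
--     return scan(rle(num), 0)
-- ===== Notes on version B (the rewrite author's own statement) =====
-- stated objective: alternative
-- what changed: A is a single bit-by-bit state machine carrying prev/current run lengths; B first builds the run-length encoding of the bits (LSB-first) and then scans the run list, taking each 1-run+1 and merging neighbouring 1-runs across zero-gaps of length exactly 1.
import Mathlib
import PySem

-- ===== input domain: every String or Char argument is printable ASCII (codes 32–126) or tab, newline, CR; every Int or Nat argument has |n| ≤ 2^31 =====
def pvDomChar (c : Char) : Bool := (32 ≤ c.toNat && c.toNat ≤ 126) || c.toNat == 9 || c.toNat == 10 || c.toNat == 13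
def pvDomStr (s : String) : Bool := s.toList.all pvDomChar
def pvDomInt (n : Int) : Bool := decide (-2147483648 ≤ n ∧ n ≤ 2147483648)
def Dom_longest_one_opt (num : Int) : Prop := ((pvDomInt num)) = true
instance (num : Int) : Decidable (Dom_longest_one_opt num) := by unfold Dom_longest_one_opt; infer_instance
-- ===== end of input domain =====

-- B replaces A's carried prev/current bit-state machine by two stages: a run-length
-- encoding of the bits, then a scan of the run list (objective: alternative).

-- termination measure for the bit loops (cited by name in decreasing_by)
theorem pvShift_toNat_lt (n : Int) (h : 0 < n) : (n >>> (1:Nat)).toNat < n.toNat := by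
  rw [Int.shiftRight_eq_div_pow]; norm_num; omega

-- ===== PORT A =====
-- the while-loop with state (current_length, prev_length, max_length);
-- 'num & k' = PySem.Int.band (Python-exact), 'num >> 1' = Int's '>>>' (Python-exact);
-- the uniform 'max_length = max(prev+current+1, max_length)' line is written in each
-- branch with that branch's updated (current, prev)
def longest_one_opt.go (num cur prev maxl : Int) : Int :=
  if h : 0 < num then
    if PySem.Int.band num 1 == 1 then
      longest_one_opt.go (num >>> (1:Nat)) (cur + 1) prev (max (prev + (cur + 1) + 1) maxl)
    else
      let prev' : Int := if PySem.Int.band num 2 == 0 then 0 else cur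
      longest_one_opt.go (num >>> (1:Nat)) 0 prev' (max (prev' + 0 + 1) maxl)
  else maxl
termination_by num.toNat
decreasing_by all_goals exact pvShift_toNat_lt num h

def longest_one_opt (num : Int) : Int :=
  longest_one_opt.go num 0 0 1

-- ===== PORT B =====
-- rleRun: Source B's inner 'while n > 0 and (n & 1) == b' loop; returns (run length, rest of n)
def rleRun (n b : Int) : Int × Int :=
  if h : 0 < n ∧ PySem.Int.band n 1 == b then
    let p := rleRun (n >>> (1:Nat)) b
    (p.1 + 1, p.2)
  else (0, n)
termination_by n.toNat
decreasing_by exact pvShift_toNat_lt n h.1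

-- termination facts for rleInt's outer loop (cited by name in decreasing_by)
theorem rleRun_snd_le (n b : Int) : (rleRun n b).2.toNat ≤ n.toNat := by
  fun_induction rleRun n b with
  | case1 n h p ih => exact le_trans ih (le_of_lt (pvShift_toNat_lt n h.1))
  | case2 n h => exact le_refl _

theorem rleInt_dec (n : Int) (h : 0 < n) :
    (rleRun n (PySem.Int.band n 1)).2.toNat < n.toNat := by
  rw [rleRun]
  simp only [h, true_and, BEq.refl, dif_pos]
  exact lt_of_le_of_lt (rleRun_snd_le _ _) (pvShift_toNat_lt n h)

-- rleInt: Source B's outer 'while n > 0' loop building the run list (bit, length), LSB first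
def rleInt (n : Int) : List (Int × Int) :=
  if h : 0 < n then
    let b := PySem.Int.band n 1
    let p := rleRun n b
    (b, p.1) :: rleInt p.2
  else []
termination_by n.toNat
decreasing_by exact rleInt_dec n h

-- scanRuns: Source B's 'scan' — max of 1, each 1-run + 1, and prev+next+1 across 1-wide zero gaps
def scanRuns (runs : List (Int × Int)) (prev : Int) : Int :=
  match runs with
  | [] => 1
  | (b, c) :: rest =>
    if b == 1 then max (c + 1) (scanRuns rest c)
    else if c == 1 then
      let nxt : Int := match rest with | [] => 0 | (_, c') :: _ => c'
      max (prev + nxt + 1) (scanRuns rest 0)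
    else scanRuns rest 0

def longest_one_opt_alt (num : Int) : Int :=
  scanRuns (rleInt num) 0

-- ===== PRECONDITION & SPEC =====
def Spec_longest_one_opt (num : Int) (out : Int) : Prop := out = longest_one_opt_alt num
instance (num : Int) (out : Int) : Decidable (Spec_longest_one_opt num out) := by unfold Spec_longest_one_opt; infer_instance

-- ===== CLAIM (what is proved, stated in full; the proofs are below) =====
def Claim_equal_longest_one_opt : Prop := ∀ (num : Int), Dom_longest_one_opt num → Spec_longest_one_opt num (longest_one_opt num)

-- ===== LEMMAS AND PROOFS =====

-- bits of a positive number, LSB first (empty for num ≤ 0)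
def pvBits (n : Int) : List Bool :=
  if h : 0 < n then (PySem.Int.band n 1 == 1) :: pvBits (n >>> (1:Nat)) else []
termination_by n.toNat
decreasing_by exact pvShift_toNat_lt n h

-- number of leading 'true's of a bit list
def pvT : List Bool → Int
  | true :: bs => pvT bs + 1
  | _ => 0

theorem pvT_nil : pvT [] = 0 := rfl
theorem pvT_true (bs : List Bool) : pvT (true :: bs) = pvT bs + 1 := rfl
theorem pvT_false (bs : List Bool) : pvT (false :: bs) = 0 := rfl

-- list-level version of A's loop
def pvA : List Bool → Int → Int → Int → Int
  | [], _, _, m => m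
  | true :: bs, c, p, m => pvA bs (c + 1) p (max (p + (c + 1) + 1) m)
  | false :: bs, c, p, m =>
    let p' : Int := if bs.head? = some true then c else 0
    pvA bs 0 p' (max (p' + 0 + 1) m)

-- intermediate single-pass form: at every zero bit record low + (ones just above) + 1
def pvB : List Bool → Int → Int → Int
  | [], low, best => max best (low + 1)
  | true :: bs, low, best => pvB bs (low + 1) best
  | false :: bs, low, best => pvB bs 0 (max best (low + pvT bs + 1))

-- arithmetic facts about the Python-exact primitives
theorem pvmod2 (n : Int) : PySem.Int.mod n 2 = n % 2 := by
  simp [PySem.Int.mod, Int.fmod_eq_emod]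

theorem pvband2 (n : Int) (h : 0 ≤ n) : PySem.Int.band n 2 = 2 * ((n / 2) % 2) := by
  rw [PySem.Int.band_of_nonneg h (by norm_num)]
  have h2 : n.toNat &&& 2 = 2 * (n.toNat / 2 % 2) := by
    have hh := Nat.and_two_pow n.toNat 1
    have ht : n.toNat.testBit 1 = decide (n.toNat / 2 % 2 = 1) := by
      simp [Nat.testBit, Nat.shiftRight_succ]
      rcases Nat.decEq (n.toNat/2%2) 1 with h1|h1 <;> simp [h1]
    rw [ht] at hh
    rcases Nat.decEq (n.toNat/2%2) 1 with h1|h1 <;> simp [h1] at hh <;> omega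
  push_cast
  omega

theorem pvband1 (n : Int) (h : 0 ≤ n) : PySem.Int.band n 1 = 0 ∨ PySem.Int.band n 1 = 1 := by
  rw [PySem.Int.band_of_nonneg h (by norm_num)]
  have h1 : (1:Int).toNat = 1 := rfl
  rw [h1]
  have := Nat.and_one_is_mod n.toNat
  omega

theorem pvshift (n : Int) : n >>> (1:Nat) = n / 2 := by
  rw [Int.shiftRight_eq_div_pow]; norm_num

theorem pvshift_nonneg (n : Int) (h : 0 ≤ n) : 0 ≤ n >>> (1:Nat) := by
  rw [pvshift]; omega

-- A's lookahead 'num & 2' agrees with the head of the remaining bit list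
theorem pvhead (n : Int) (h : 0 < n) :
    ((PySem.Int.band n 2 == 0) = true ↔ ¬ (pvBits (n >>> (1:Nat))).head? = some true) := by
  rw [pvBits.eq_def, pvshift]
  have hb2 := pvband2 n (le_of_lt h)
  by_cases h2 : 0 < n / 2
  · simp only [h2, dif_pos, List.head?_cons, Option.some.injEq]
    rw [PySem.Int.band_one, pvmod2]
    constructor
    · intro he ht
      simp at he ht
      omega
    · intro ht
      simp only [beq_iff_eq]
      by_contra he
      apply ht
      simp only [beq_iff_eq]
      omega
  · have : n / 2 = 0 := by omega
    simp [hb2, this]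

theorem goA_eq_pvA (num cur prev maxl : Int) :
    longest_one_opt.go num cur prev maxl = pvA (pvBits num) cur prev maxl := by
  fun_induction longest_one_opt.go num cur prev maxl with
  | case1 num cur prev maxl h hb ih =>
    rw [pvBits.eq_def]
    simp only [h, dif_pos, hb, pvA]
    exact ih
  | case2 num cur prev maxl h hb prev' ih =>
    rw [pvBits.eq_def]
    have hb' : (PySem.Int.band num 1 == 1) = false := by simpa using hb
    simp only [h, dif_pos, hb', pvA]
    have hp : prev' = (if (pvBits (num >>> (1:Nat))).head? = some true then cur else 0) := by
      have hh := pvhead num h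
      by_cases ht : (pvBits (num >>> (1:Nat))).head? = some true
      · have : ¬ (PySem.Int.band num 2 == 0) = true := fun he => (hh.mp he) ht
        simp only [prev', ht, if_pos, Bool.not_eq_true] at *
        simp [this]
      · have : (PySem.Int.band num 2 == 0) = true := hh.mpr ht
        simp [prev', ht, this]
    rw [← hp]
    exact ih
  | case3 num cur prev maxl h =>
    rw [pvBits.eq_def]
    simp [h, pvA]

theorem pvT_nonneg (bs : List Bool) : 0 ≤ pvT bs := by
  induction bs with
  | nil => simp [pvT_nil]
  | cons b bs ih => cases b
                    · simp [pvT_false]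
                    · rw [pvT_true]; omega

theorem pvB_ge_best (bs : List Bool) : ∀ (low best : Int), best ≤ pvB bs low best := by
  induction bs with
  | nil => intro low best; simp [pvB]
  | cons b bs ih =>
    intro low best
    cases b
    · exact le_trans (le_max_left _ _) (ih 0 _)
    · exact ih (low + 1) best

theorem pvB_ge (bs : List Bool) : ∀ (low best : Int), low + pvT bs + 1 ≤ pvB bs low best := by
  induction bs with
  | nil => intro low best; simp [pvT_nil, pvB]
  | cons b bs ih =>
    intro low best
    cases b
    · have h1 := pvB_ge_best bs 0 (max best (low + pvT bs + 1))
      have h2 := pvT_nonneg bs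
      simp only [pvB, pvT_false]
      omega
    · have := ih (low + 1) best
      simp only [pvB, pvT_true]
      omega

theorem pvB_max (bs : List Bool) : ∀ (low a b : Int), pvB bs low (max a b) = max a (pvB bs low b) := by
  induction bs with
  | nil => intro low a b; simp only [pvB]; omega
  | cons bb bs ih =>
    intro low a b
    cases bb
    · simp only [pvB]
      rw [show max (max a b) (low + pvT bs + 1) = max a (max b (low + pvT bs + 1)) by omega, ih]
    · simp only [pvB]; exact ih (low + 1) a b

theorem pvA_eq_pvB (bs : List Bool) : ∀ (c p m : Int), 0 ≤ c → 0 ≤ p → p + c + 1 ≤ m →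
    pvA bs c p m = pvB bs c (max m (p + c + pvT bs + 1)) := by
  induction bs with
  | nil => intro c p m hc hp hm; simp [pvA, pvB, pvT_nil]; omega
  | cons b bs ih =>
    intro c p m hc hp hm
    cases b
    · -- zero bit: A resets (prev', cur) ; pvB records low + trailing ones + 1
      simp only [pvA, pvB, pvT_false]
      have hT := pvT_nonneg bs
      have hfacts : ((bs.head? = some true → 1 ≤ pvT bs) ∧ (¬ bs.head? = some true → pvT bs = 0)) := by
        rcases bs with _ | ⟨b', bs'⟩
        · simp [pvT_nil]
        · cases b'
          · simp [pvT_false]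
          · have := pvT_nonneg bs'
            simp [pvT_true]
            omega
      by_cases ht : bs.head? = some true
      · simp only [ht, if_pos]
        rw [ih 0 c (max (c + 0 + 1) m) (by omega) hc (by omega)]
        congr 1
        have := hfacts.1 ht
        omega
      · simp only [ht, if_false]
        rw [ih 0 0 (max (0 + 0 + 1) m) (by omega) (by omega) (by omega)]
        congr 1
        have := hfacts.2 ht
        omega
    · -- one bit: both extend the current run
      simp only [pvA, pvB, pvT_true]
      have hT := pvT_nonneg bs
      rw [ih (c + 1) p (max (p + (c + 1) + 1) m) (by omega) hp (by omega)]
      congr 1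
      omega

-- ===== relating B's two-stage computation to pvB =====

-- flatten a run list back to bits
def flatR : List (Int × Int) → List Bool
  | [] => []
  | (b, c) :: rest => List.replicate c.toNat (b == 1) ++ flatR rest

-- well-formed run lists: bits in {0,1}, lengths ≥ 1, alternating, last run is ones
def goodRuns : List (Int × Int) → Prop
  | [] => True
  | (b, c) :: rest =>
    (b = 0 ∨ b = 1) ∧ 1 ≤ c ∧
    (match rest with
     | [] => b = 1
     | (b', _) :: _ => b' ≠ b) ∧
    goodRuns rest

theorem scanRuns_ge_one (rs : List (Int × Int)) : ∀ (prev : Int), 1 ≤ scanRuns rs prev := by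
  induction rs with
  | nil => intro prev; simp [scanRuns]
  | cons r rest ih =>
    intro prev
    obtain ⟨b, c⟩ := r
    simp only [scanRuns]
    split_ifs
    · exact le_trans (ih c) (le_max_right _ _)
    · exact le_trans (ih 0) (le_max_right _ _)
    · exact ih 0

theorem scanRuns_one (c : Int) (rest : List (Int × Int)) (prev : Int) :
    scanRuns ((1, c) :: rest) prev = max (c + 1) (scanRuns rest c) := rfl

theorem scanRuns_zero1 (b' c' : Int) (rest : List (Int × Int)) (prev : Int) :
    scanRuns ((0, 1) :: (b', c') :: rest) prev
      = max (prev + c' + 1) (scanRuns ((b', c') :: rest) 0) := rfl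

theorem scanRuns_zerow (k b' c' : Int) (rest : List (Int × Int)) (prev : Int) (hk : ¬ k = 1) :
    scanRuns ((0, k) :: (b', c') :: rest) prev = scanRuns ((b', c') :: rest) 0 := by
  simp only [scanRuns]
  norm_num [hk]

-- pvT of the flattening
theorem pvT_flat_zero (rs : List (Int × Int)) (hg : goodRuns rs)
    (hz : rs = [] ∨ ∃ k rest, rs = (0, k) :: rest) : pvT (flatR rs) = 0 := by
  rcases hz with h | ⟨k, rest, h⟩
  · subst h; rfl
  · subst h
    obtain ⟨_, hk, _, _⟩ := hg
    have hk' : 1 ≤ k.toNat := by omega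
    rcases Nat.exists_eq_add_of_le hk' with ⟨j, hj⟩
    simp only [flatR]
    rw [show k.toNat = j + 1 by omega, List.replicate_succ]
    simp [pvT_false]

theorem pvT_replicate_true (k : Nat) (bs : List Bool) :
    pvT (List.replicate k true ++ bs) = (k : Int) + pvT bs := by
  induction k with
  | zero => simp
  | succ j ih =>
    rw [List.replicate_succ, List.cons_append, pvT_true, ih]
    push_cast
    ring

-- pvB over a block of ones just extends low
theorem pvB_ones (k : Nat) : ∀ (bs : List Bool) (low best : Int),
    pvB (List.replicate k true ++ bs) low best = pvB bs (low + (k : Int)) best := by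
  induction k with
  | zero => intro bs low best; simp
  | succ j ih =>
    intro bs low best
    rw [List.replicate_succ, List.cons_append]
    simp only [pvB]
    rw [ih]
    congr 1
    push_cast
    ring

-- pvB over a block of zeros entered with low = 0
theorem pvB_zeros (j : Nat) (hj : 1 ≤ j) : ∀ (bs : List Bool) (B : Int),
    pvB (List.replicate j false ++ bs) 0 B = pvB bs 0 (max B (pvT bs + 1)) := by
  induction j with
  | zero => omega
  | succ i ih =>
    intro bs B
    rw [List.replicate_succ, List.cons_append]
    simp only [pvB]
    rcases Nat.eq_zero_or_pos i with hi | hi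
    · subst hi; simp
    · rw [ih hi]
      have h0 : pvT (List.replicate i false ++ bs) = 0 := by
        rcases Nat.exists_eq_add_of_le hi with ⟨m, hm⟩
        rw [show i = m + 1 by omega, List.replicate_succ, List.cons_append, pvT_false]
      rw [h0]
      congr 1
      have := pvT_nonneg bs
      omega

-- the main bridge: scanning the run list computes pvB on the flattened bits
theorem pvM (rs : List (Int × Int)) (hg : goodRuns rs) :
    (∀ (best : Int), (∃ c rest, rs = (1, c) :: rest) →
        pvB (flatR rs) 0 best = max best (scanRuns rs 0)) ∧
    (∀ (low best : Int), 0 ≤ low → (rs = [] ∨ ∃ k rest, rs = (0, k) :: rest) →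
        pvB (flatR rs) low best = max best (max (low + 1) (scanRuns rs low))) := by
  induction rs with
  | nil =>
    refine ⟨fun best h => by simp at h, fun low best hl h => ?_⟩
    simp only [flatR, pvB, scanRuns]
    omega
  | cons r rest ih =>
    obtain ⟨b, c⟩ := r
    obtain ⟨hb01, hc, halt, hgrest⟩ := hg
    have ihr := ih hgrest
    constructor
    · -- head is a 1-run
      rintro best ⟨c', rest', heq⟩
      injection heq with h1 h2
      injection h1 with hb hc'
      subst hb; subst hc'; subst h2
      have hcc : (0 : Int) + (c.toNat : Int) = c := by omega
      simp only [flatR, beq_self_eq_true]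
      rw [pvB_ones, hcc]
      have hscan : scanRuns ((1, c) :: rest) 0 = max (c + 1) (scanRuns rest c) :=
        scanRuns_one c rest 0
      rcases rest with _ | ⟨⟨b', c''⟩, rest2⟩
      · -- single 1-run
        have h1 : scanRuns ([] : List (Int × Int)) c = 1 := rfl
        simp only [flatR, pvB, hscan, h1]
        omega
      · -- followed by a zero run (alternation: b' ≠ 1 and b' ∈ {0,1})
        have hb' : b' = 0 := by
          rcases hgrest.1 with h | h
          · exact h
          · exact absurd h (by simpa using halt)
        subst hb'
        rw [ihr.2 c best (by omega) (Or.inr ⟨c'', rest2, rfl⟩), hscan]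
    · -- head is a 0-run (or nil — impossible here)
      rintro low best hl (h | ⟨k, rest', heq⟩)
      · exact absurd h (by simp)
      injection heq with h1 h2
      injection h1 with hb hk
      subst hb; subst hk; subst h2
      -- rest must be a nonempty 1-run-headed list
      rcases rest with _ | ⟨⟨b', cn⟩, rest2⟩
      · exact absurd halt (by simp)
      have hb' : b' = 1 := by
        rcases hgrest.1 with h | h
        · exact absurd h (by simpa using halt)
        · exact h
      subst hb'
      have hcn : 1 ≤ cn := hgrest.2.1
      -- pvT of flattened rest is cn
      have hTrest : pvT (flatR ((1, cn) :: rest2)) = cn := by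
        simp only [flatR, beq_self_eq_true]
        rw [pvT_replicate_true]
        have h0 : pvT (flatR rest2) = 0 := by
          apply pvT_flat_zero rest2 hgrest.2.2.2
          rcases rest2 with _ | ⟨⟨b2, c2⟩, rest3⟩
          · exact Or.inl rfl
          · have hb2 : b2 = 0 := by
              rcases hgrest.2.2.2.1 with h | h
              · exact h
              · exact absurd h (by simpa using hgrest.2.2.1)
            exact Or.inr ⟨c2, rest3, by rw [hb2]⟩
        omega
      have hP := ihr.1
      have hscan1 : 1 ≤ scanRuns ((1, cn) :: rest2) 0 := scanRuns_ge_one _ 0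
      have hscanhead : cn + 1 ≤ scanRuns ((1, cn) :: rest2) 0 := by
        rw [scanRuns_one]
        exact le_max_left _ _
      have hk1 : 1 ≤ c.toNat := by omega
      rcases Nat.exists_eq_add_of_le hk1 with ⟨j, hj⟩
      have hb01f : ((0:Int) == 1) = false := by decide
      have hflat0 : flatR ((0, c) :: (1, cn) :: rest2)
          = List.replicate c.toNat false ++ flatR ((1, cn) :: rest2) := by
        simp only [flatR, hb01f]
      rw [hflat0, show c.toNat = j + 1 by omega, List.replicate_succ, List.cons_append]
      simp only [pvB]
      rcases Nat.eq_zero_or_pos j with hjz | hjp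
      · -- zero-gap of width exactly 1: the merge candidate fires
        subst hjz
        simp only [List.replicate, List.nil_append]
        rw [hTrest, hP (max best (low + cn + 1)) ⟨cn, rest2, rfl⟩]
        have hkone : c = 1 := by omega
        subst hkone
        rw [scanRuns_zero1]
        omega
      · -- wider zero gap: no merge candidate
        have hT0 : pvT (List.replicate j false ++ flatR ((1, cn) :: rest2)) = 0 := by
          rcases Nat.exists_eq_add_of_le hjp with ⟨m, hm⟩
          rw [show j = m + 1 by omega, List.replicate_succ, List.cons_append, pvT_false]
        rw [hT0, pvB_zeros j hjp, hTrest, hP _ ⟨cn, rest2, rfl⟩]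
        rw [scanRuns_zerow c 1 cn rest2 low (by omega)]
        omega

-- rleRun splits off exactly the leading run of bit b
theorem rleRun_spec (n b : Int) (hb : b = 0 ∨ b = 1) (hn : 0 ≤ n) :
    0 ≤ (rleRun n b).1 ∧ 0 ≤ (rleRun n b).2 ∧
    pvBits n = List.replicate (rleRun n b).1.toNat (b == 1) ++ pvBits (rleRun n b).2 ∧
    ¬ (0 < (rleRun n b).2 ∧ PySem.Int.band (rleRun n b).2 1 == b) ∧
    (b = 0 → 0 < n → 0 < (rleRun n b).2) := by
  fun_induction rleRun n b with
  | case1 n h p ih =>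
    have hn2 : 0 ≤ n >>> (1:Nat) := pvshift_nonneg n hn
    obtain ⟨ih1, ih2, ih3, ih4, ih5⟩ := ih hn2
    have hhead : (PySem.Int.band n 1 == 1) = (b == 1) := by
      rcases hb with hb0 | hb1
      · subst hb0
        have h2 := h.2
        simp only [beq_iff_eq] at h2
        rw [h2]
      · subst hb1; exact h.2
    show 0 ≤ (rleRun (n >>> (1:Nat)) b).1 + 1 ∧ 0 ≤ (rleRun (n >>> (1:Nat)) b).2 ∧
        pvBits n = List.replicate ((rleRun (n >>> (1:Nat)) b).1 + 1).toNat (b == 1)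
          ++ pvBits (rleRun (n >>> (1:Nat)) b).2 ∧
        ¬ (0 < (rleRun (n >>> (1:Nat)) b).2 ∧
           PySem.Int.band (rleRun (n >>> (1:Nat)) b).2 1 == b) ∧
        (b = 0 → 0 < n → 0 < (rleRun (n >>> (1:Nat)) b).2)
    refine ⟨by have h1 := ih1; omega, ih2, ?_, ih4, ?_⟩
    · rw [pvBits.eq_def]
      simp only [h.1, dif_pos]
      rw [hhead, ih3,
        show ((rleRun (n >>> (1:Nat)) b).1 + 1).toNat = (rleRun (n >>> (1:Nat)) b).1.toNat + 1
          by omega,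
        List.replicate_succ]
      rfl
    · intro hb0 _
      apply ih5 hb0
      subst hb0
      have heven : PySem.Int.band n 1 = 0 := by
        have := h.2; simpa using this
      have := pvband2 n hn
      rw [PySem.Int.band_one, pvmod2] at heven
      rw [pvshift]
      have h1 := h.1
      omega
  | case2 n h =>
    refine ⟨le_refl 0, hn, by simp, h, fun _ hpos => hpos⟩

-- rleInt produces a well-formed run list that flattens to the bits
theorem rleInt_spec (n : Int) (hn : 0 ≤ n) :
    flatR (rleInt n) = pvBits n ∧ goodRuns (rleInt n) ∧
    (rleInt n = [] ∨ ∃ c rest, rleInt n = (PySem.Int.band n 1, c) :: rest) := by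
  fun_induction rleInt n with
  | case1 n h b p ih =>
    have hb : b = 0 ∨ b = 1 := pvband1 n (le_of_lt h)
    have hcond : 0 < n ∧ PySem.Int.band n 1 == b := ⟨h, by simp [b]⟩
    obtain ⟨hr1, hr2, hr3, hr4, hr5⟩ := rleRun_spec n b hb (le_of_lt h)
    obtain ⟨ih1, ih2, ih3⟩ := ih hr2
    have hp1pos : 1 ≤ p.1 := by
      have : rleRun n b = ((rleRun (n >>> (1:Nat)) b).1 + 1, (rleRun (n >>> (1:Nat)) b).2) := by
        rw [rleRun]
        simp [hcond.1, hcond.2]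
      have h1 := (rleRun_spec (n >>> (1:Nat)) b hb (pvshift_nonneg n (le_of_lt h))).1
      simp only [p, this]
      omega
    refine ⟨?_, ?_, Or.inr ⟨p.1, rleInt p.2, rfl⟩⟩
    · simp only [flatR]
      rw [ih1, ← hr3]
    · refine ⟨hb, hp1pos, ?_, ih2⟩
      rcases ih3 with hnil | ⟨c', rest', heq⟩
      · -- rest empty: p.2 ≤ 0, so b must be 1 (a zero run would leave a positive rest)
        rw [hnil]
        simp only
        rcases hb with hb0 | hb1
        · exfalso
          have hpos : 0 < p.2 := hr5 hb0 h
          rw [rleInt] at hnil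
          rw [dif_pos hpos] at hnil
          exact absurd hnil (by simp)
        · exact hb1
      · rw [heq]
        simp only [ne_eq]
        intro hcontra
        -- head bit of rest equals band p.2 1; the stop condition says it differs from b
        have hpos : 0 < p.2 := by
          by_contra hle
          rw [rleInt] at heq
          simp only [hle] at heq
          exact absurd heq (by simp)
        exact hr4 ⟨hpos, show (PySem.Int.band p.2 1 == b) = true by
          rw [hcontra]; exact beq_self_eq_true b⟩
  | case2 n h =>
    refine ⟨?_, trivial, Or.inl rfl⟩
    rw [pvBits.eq_def]
    simp only [h]
    rfl

-- B's two stages compute pvB on the bit list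
theorem altB_eq_pvB (n : Int) (hn : 0 ≤ n) :
    scanRuns (rleInt n) 0 = pvB (pvBits n) 0 1 := by
  obtain ⟨hflat, hgood, hhead⟩ := rleInt_spec n hn
  obtain ⟨hP, hQ⟩ := pvM (rleInt n) hgood
  have hge := scanRuns_ge_one (rleInt n) 0
  rcases hhead with hnil | ⟨c, rest, heq⟩
  · rw [hnil] at hflat ⊢
    rw [← hflat]
    simp only [flatR, pvB, scanRuns]
    omega
  · rcases pvband1 n hn with hb0 | hb1
    · rw [hb0] at heq
      rw [← hflat, hQ 0 1 (le_refl 0) (Or.inr ⟨c, rest, heq⟩)]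
      omega
    · rw [hb1] at heq
      rw [← hflat, hP 1 ⟨c, rest, heq⟩]
      omega

-- ===== VERDICT (by name: the statement is the Claim_ definition above) =====
theorem longest_one_opt_spec : Claim_equal_longest_one_opt := by
  intro num _
  show longest_one_opt num = longest_one_opt_alt num
  by_cases hpos : 0 < num
  case neg =>
    -- num ≤ 0: A's loop and B's rle both do nothing
    rw [longest_one_opt, longest_one_opt_alt, longest_one_opt.go, rleInt]
    simp [hpos, scanRuns]
  case pos =>
    rw [longest_one_opt, longest_one_opt_alt, goA_eq_pvA, altB_eq_pvB num (le_of_lt hpos)]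
    rw [pvA_eq_pvB (pvBits num) 0 0 1 (by omega) (by omega) (by omega)]
    have hT := pvT_nonneg (pvBits num)
    rw [show max 1 (0 + 0 + pvT (pvBits num) + 1) = max (pvT (pvBits num) + 1) 1 by omega]
    rw [pvB_max]
    have := pvB_ge (pvBits num) 0 1
    omega
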